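-- pv_equiv track=rewrite | github.com/MouettE-SC/advent-of-code | 2023/day-13b.py | get_cands
-- ===== SOURCE A (Python) =====
-- def get_cands(line):
--     cand = set()
--     for j in range(1, len(line)):
--         ok = True
--         for c1, c2 in zip(line[0:j][::-1], line[j:]):
--             if c1 != c2:
--                 ok = False
--                 break
--         if ok:
--             cand.add(j)
--     return cand
-- ===== SOURCE B (Python) =====
-- def get_cands(line):
--     # Single left-to-right sweep maintaining a worklist of "alive" mirror
--     # centres: centre j is alive while every pair (2*j-1-i, i) checked so far
--     # matched.  A centre whose left side runs out is a confirmed mirror; the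
--     # survivors at the end of the string are mirrors too.
--     n = len(line)
--     done = []
--     alive = []
--     for i in range(1, n):
--         alive.append(i)          # centre j = i opens with pair (i-1, i)
--         nxt = []
--         for j in alive:
--             left = 2 * j - 1 - i
--             if left < 0:
--                 done.append(j)   # reflected prefix fully matched
--             elif line[left] == line[i]:
--                 nxt.append(j)
--         alive = nxt
--     return set(done + alive)
-- ===== Notes on version B (the rewrite author's own statement) =====
-- stated objective: alternative
-- what changed: B replaces A's per-split scan (for each split j, zip the reversed prefix with the suffix and compare) by a single left-to-right sweep of the string that maintains a worklist of still-alive mirror centres: each character read extends every alive centre by one pair, centres whose left side runs out are confirmed, survivors at the end are confirmed too.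
import Mathlib
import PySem

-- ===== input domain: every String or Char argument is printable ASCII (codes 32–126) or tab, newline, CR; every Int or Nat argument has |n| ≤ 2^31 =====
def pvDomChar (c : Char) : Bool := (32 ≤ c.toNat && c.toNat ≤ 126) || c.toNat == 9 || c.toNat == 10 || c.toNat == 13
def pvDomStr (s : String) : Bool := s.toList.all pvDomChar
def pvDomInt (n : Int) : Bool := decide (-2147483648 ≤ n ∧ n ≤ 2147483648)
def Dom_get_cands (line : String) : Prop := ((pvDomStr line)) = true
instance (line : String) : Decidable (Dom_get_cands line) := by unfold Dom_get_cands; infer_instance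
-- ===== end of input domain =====

-- B replaces A's per-split reversed-prefix/suffix scan by ONE left-to-right sweep of the
-- string that maintains a worklist of still-alive mirror centres (alternative decomposition).

-- ===== PORT A =====
-- inner loop 'for c1, c2 in zip(...): if c1 != c2: ok = False; break' (break = stop recursing)
def pvLoopA : List (Char × Char) → Bool
  | [] => true
  | (c1, c2) :: rest => if c1 ≠ c2 then false else pvLoopA rest

def get_cands (line : String) : List Int :=
  -- line[0:j][::-1] is the reverse of the slice (PySem.List.slice?_none_none_neg_one)
  (PySem.List.pyRange 1 (line.toList.length : Int) 1).foldl
    (fun cand j =>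
      if pvLoopA (List.zip (PySem.List.slice line.toList (some 0) (some j)).reverse
                           (PySem.List.slice line.toList (some j) none))
      then PySem.Set.add cand j else cand)
    PySem.Set.empty

-- ===== PORT B =====
-- body of 'for j in alive': classify j as finished (left index ran out), still alive, or dead
def pvInnerB (cs : List Char) (i : Int) (st : List Int × List Int) (j : Int) : List Int × List Int :=
  let left := 2 * j - 1 - i
  if left < 0 then (st.1 ++ [j], st.2)
  else if PySem.List.pyGet? cs left == PySem.List.pyGet? cs i then (st.1, st.2 ++ [j])
  else st

-- one iteration of 'for i in range(1, n)': open centre i, then filter the worklist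
def pvStepB (cs : List Char) (st : List Int × List Int) (i : Int) : List Int × List Int :=
  (st.2 ++ [i]).foldl (pvInnerB cs i) (st.1, [])

def get_cands_alt (line : String) : List Int :=
  let st := (PySem.List.pyRange 1 (line.toList.length : Int) 1).foldl (pvStepB line.toList) ([], [])
  PySem.Set.ofList (st.1 ++ st.2)

-- ===== PRECONDITION & SPEC =====
def Spec_get_cands (line : String) (out : List Int) : Prop := out = get_cands_alt line
instance (line : String) (out : List Int) : Decidable (Spec_get_cands line out) := by unfold Spec_get_cands; infer_instance

-- ===== CLAIM (what is proved, stated in full; the proofs are below) =====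
def Claim_equal_get_cands : Prop := ∀ (line : String), Dom_get_cands line → Spec_get_cands line (get_cands line)

-- ===== LEMMAS AND PROOFS =====

-- pair (2*j-1-i, i) around centre j matches
def pvMatch (cs : List Char) (j i : Int) : Bool :=
  PySem.List.pyGet? cs (2 * j - 1 - i) == PySem.List.pyGet? cs i

-- all pairs of centre j with right index in [j, K) match
def pvGood (cs : List Char) (j K : Int) : Bool :=
  (PySem.List.pyRange j K 1).all (pvMatch cs j)

-- state of B's sweep after processing right indices 1..k-1
def pvDone (cs : List Char) (k : Int) : List Int :=
  (PySem.List.pyRange 1 k 1).filter (fun j => decide (2 * j < k) && pvGood cs j (2 * j))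

def pvAlive (cs : List Char) (k : Int) : List Int :=
  (PySem.List.pyRange 1 k 1).filter (fun j => decide (k ≤ 2 * j) && pvGood cs j k)

theorem innerB_spec (cs : List Char) (i : Int) (L d nx : List Int) :
    L.foldl (pvInnerB cs i) (d, nx) =
      (d ++ L.filter (fun j => decide (2 * j - 1 - i < 0)),
       nx ++ L.filter (fun j => !decide (2 * j - 1 - i < 0) && pvMatch cs j i)) := by
  induction L generalizing d nx with
  | nil => simp
  | cons x xs ih =>
      simp only [List.foldl_cons, pvInnerB, pvMatch, List.filter_cons]
      by_cases h1 : 2 * x - 1 - i < 0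
      · simp [h1, ih, pvMatch]
      · by_cases h2 : PySem.List.pyGet? cs (2 * x - 1 - i) == PySem.List.pyGet? cs i
        · simp [h1, h2, ih, pvMatch]
        · simp [h1, h2, ih, pvMatch]

theorem pvGood_succ (cs : List Char) (j k : Int) (h : j ≤ k) :
    pvGood cs j (k + 1) = (pvGood cs j k && pvMatch cs j k) := by
  unfold pvGood
  rw [PySem.List.pyRange_one_succ_right h, List.all_append]
  simp

-- filters of an ascending list whose p-elements all precede its q-elements concatenate to one filter
theorem filter_append_filter_sorted (l : List Int) (p q : Int → Bool)
    (hs : l.Pairwise (· < ·))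
    (h : ∀ x ∈ l, ∀ y ∈ l, p x = true → q y = true → x < y) :
    l.filter p ++ l.filter q = l.filter (fun x => p x || q x) := by
  induction l with
  | nil => simp
  | cons a l ih =>
      rw [List.pairwise_cons] at hs
      by_cases hp : p a = true
      · have hq : q a = false := by
          by_contra hq
          exact absurd (h a (by simp) a (by simp) hp (by simpa using hq)) (lt_irrefl a)
        simp only [List.filter_cons, hp, hq, Bool.false_eq_true, if_false, if_true,
          Bool.true_or, List.cons_append, List.cons.injEq, true_and]
        exact ih hs.2 (fun x hx y hy px qy => h x (by simp [hx]) y (by simp [hy]) px qy)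
      · by_cases hq : q a = true
        · have hpl : l.filter p = [] := by
            rw [List.filter_eq_nil_iff]
            intro x hx hpx
            exact absurd (h x (by simp [hx]) a (by simp) hpx hq) (not_lt.mpr (hs.1 x hx).le)
          have hpf : ∀ x ∈ l, p x = false := by
            intro x hx
            rcases List.filter_eq_nil_iff.mp hpl x hx with h'
            simpa using h'
          rw [Bool.not_eq_true] at hp
          simp only [List.filter_cons, hp, hq, Bool.false_eq_true, if_false, if_true,
            Bool.false_or, hpl, List.nil_append, List.cons.injEq, true_and]
          apply (List.filter_congr _).symm
          intro x hx
          simp [hpf x hx]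
        · rw [Bool.not_eq_true] at hp hq
          simp only [List.filter_cons, hp, hq, Bool.false_eq_true, if_false, Bool.false_or]
          exact ih hs.2 (fun x hx y hy px qy => h x (by simp [hx]) y (by simp [hy]) px qy)

theorem stepB_inv (cs : List Char) (k : Int) (hk : 1 ≤ k) :
    pvStepB cs (pvDone cs k, pvAlive cs k) k = (pvDone cs (k + 1), pvAlive cs (k + 1)) := by
  unfold pvStepB
  rw [innerB_spec]
  simp only [Prod.mk.injEq]
  constructor
  · -- done component
    rw [List.filter_append, List.filter_singleton,
        show decide (2 * k - 1 - k < 0) = false from by simp; omega]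
    unfold pvDone pvAlive
    rw [List.filter_filter]
    simp only [cond_false, List.append_nil]
    rw [PySem.List.pyRange_one_succ_right hk, List.filter_append, List.filter_singleton,
        show decide (2 * k < k + 1) = false from by simp; omega]
    simp only [Bool.false_and, cond_false, List.append_nil]
    rw [filter_append_filter_sorted _ _ _ (PySem.List.pairwise_lt_pyRange_one 1 k)
          (by intro x hx y hy px qy
              simp only [Bool.and_eq_true, decide_eq_true_eq] at px qy
              omega)]
    apply List.filter_congr
    intro x hx
    rw [PySem.List.mem_pyRange_one] at hx
    by_cases h2 : 2 * x = k
    · subst h2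
      simp [show 2 * x < 2 * x + 1 from by omega]
    · by_cases h3 : 2 * x < k
      · simp [h3, show 2 * x - 1 - k < 0 from by omega, show ¬(k ≤ 2 * x) from by omega,
              show 2 * x < k + 1 from by omega]
      · simp [h3, show ¬(2 * x - 1 - k < 0) from by omega, show ¬(2 * x < k + 1) from by omega]
  · -- alive component
    rw [List.nil_append, List.filter_append, List.filter_singleton]
    unfold pvAlive
    rw [List.filter_filter]
    rw [PySem.List.pyRange_one_succ_right hk, List.filter_append, List.filter_singleton]
    congr 1
    · apply List.filter_congr
      intro x hx
      rw [PySem.List.mem_pyRange_one] at hx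
      rw [pvGood_succ cs x k (by omega)]
      by_cases h2 : k + 1 ≤ 2 * x
      · simp [show ¬(2 * x - 1 - k < 0) from by omega, show k ≤ 2 * x from by omega, h2,
              Bool.and_comm]
      · simp [show 2 * x - 1 - k < 0 from by omega, h2]
    · have hgm : pvGood cs k (k + 1) = pvMatch cs k k := by
        rw [pvGood_succ cs k k le_rfl]
        unfold pvGood
        rw [PySem.List.pyRange_one_eq_nil le_rfl]
        simp
      simp [hgm, show ¬(2 * k - 1 - k < 0) from by omega, show k + 1 ≤ 2 * k from by omega]

theorem outer_inv (cs : List Char) (m : Nat) :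
    (PySem.List.pyRange 1 (1 + (m : Int)) 1).foldl (pvStepB cs) ([], []) =
      (pvDone cs (1 + m), pvAlive cs (1 + m)) := by
  induction m with
  | zero =>
      simp [PySem.List.pyRange_one_eq_nil (by omega : (1:Int) ≤ 1), pvDone, pvAlive]
  | succ m ih =>
      have h1 : (1 : Int) ≤ 1 + m := by omega
      have : (1 + ((m : Int) + 1)) = (1 + (m : Int)) + 1 := by ring
      rw [show ((m + 1 : Nat) : Int) = (m : Int) + 1 from by push_cast; ring, this,
          PySem.List.pyRange_one_succ_right h1, List.foldl_append, ih]
      simpa using stepB_inv cs (1 + m) h1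

theorem pvLoopA_zip_iff (xs ys : List Char) :
    pvLoopA (xs.zip ys) = true ↔
      ∀ t (h1 : t < xs.length) (h2 : t < ys.length), xs[t] = ys[t] := by
  induction xs generalizing ys with
  | nil => simp [pvLoopA]
  | cons x xt ih =>
      cases ys with
      | nil => simp [pvLoopA]
      | cons y yt =>
          simp only [List.zip_cons_cons, pvLoopA]
          by_cases h : x = y
          · rw [if_neg (by simp [h]), ih yt]
            constructor
            · intro hall t h1 h2
              cases t with
              | zero => simpa using h
              | succ t => simpa using hall t (by simpa using h1) (by simpa using h2)
            · intro hall t h1 h2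
              simpa using hall (t + 1) (by simpa using h1) (by simpa using h2)
          · simp only [ne_eq, h, not_false_eq_true, if_true]
            constructor
            · intro hc; exact absurd hc (by simp)
            · intro hall; exact absurd (by simpa using hall 0 (by simp) (by simp)) h
  
theorem pvGood_iff (cs : List Char) (j K : Int) :
    pvGood cs j K = true ↔ ∀ i : Int, j ≤ i → i < K → pvMatch cs j i = true := by
  unfold pvGood
  rw [List.all_eq_true]
  constructor
  · intro h i h1 h2; exact h i (by rw [PySem.List.mem_pyRange_one]; exact ⟨h1, h2⟩)
  · intro h i hi; rw [PySem.List.mem_pyRange_one] at hi; exact h i hi.1 hi.2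

theorem pvMatch_nat (cs : List Char) (k t : Nat) (h1 : t < k) (h2 : k + t < cs.length) :
    pvMatch cs (k : Int) ((k : Int) + (t : Int)) =
      (cs[k - 1 - t]'(by omega) == cs[k + t]'h2) := by
  unfold pvMatch
  rw [show 2 * (k : Int) - 1 - ((k : Int) + (t : Int)) = ((k - 1 - t : Nat) : Int) from by omega,
      PySem.List.pyGet?_natCast,
      show (k : Int) + (t : Int) = ((k + t : Nat) : Int) from by push_cast; ring,
      PySem.List.pyGet?_natCast]
  rw [List.getElem?_eq_getElem (by omega), List.getElem?_eq_getElem h2]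
  simp

theorem zip_eq_good (cs : List Char) (k : Nat) (hk : k < cs.length) :
    pvLoopA ((cs.take k).reverse.zip (cs.drop k)) =
      pvGood cs (k : Int) (min (2 * (k : Int)) (cs.length : Int)) := by
  rw [Bool.eq_iff_iff, pvLoopA_zip_iff, pvGood_iff]
  simp only [List.length_reverse, List.length_take, List.length_drop,
    List.getElem_reverse, List.getElem_take, List.getElem_drop,
    Nat.min_eq_left hk.le]
  constructor
  · intro H i h1 h2
    obtain ⟨t, rfl⟩ : ∃ t : Nat, i = (k : Int) + t := ⟨(i - (k : Int)).toNat, by omega⟩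
    rw [pvMatch_nat cs k t (by omega) (by omega), beq_iff_eq]
    have h := H t (by omega) (by omega)
    convert h using 2
  · intro H t h1 h2
    have h := H ((k : Int) + (t : Int)) (by omega) (by omega)
    rw [pvMatch_nat cs k t (by omega) (by omega), beq_iff_eq] at h
    convert h using 2

theorem pointwise (cs : List Char) (j : Int) (hj1 : 1 ≤ j) (hj2 : j < (cs.length : Int)) :
    pvLoopA (List.zip (PySem.List.slice cs (some 0) (some j)).reverse
                      (PySem.List.slice cs (some j) none)) =
      ((decide (2 * j < (cs.length : Int)) && pvGood cs j (2 * j)) ||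
       (decide ((cs.length : Int) ≤ 2 * j) && pvGood cs j (cs.length : Int))) := by
  obtain ⟨k, rfl⟩ : ∃ k : Nat, j = (k : Int) := ⟨j.toNat, (Int.toNat_of_nonneg (by omega)).symm⟩
  have hk : k < cs.length := by exact_mod_cast hj2
  rw [PySem.List.slice_zero_start, PySem.List.slice_to_natCast, PySem.List.slice_from_natCast,
      zip_eq_good cs k hk]
  by_cases hc : 2 * (k : Int) < (cs.length : Int)
  · rw [show min (2 * (k : Int)) (cs.length : Int) = 2 * (k : Int) from by omega]
    simp [hc, show ¬((cs.length : Int) ≤ 2 * (k : Int)) from by omega]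
  · rw [show min (2 * (k : Int)) (cs.length : Int) = (cs.length : Int) from by omega]
    simp [hc, show (cs.length : Int) ≤ 2 * (k : Int) from by omega]

theorem final_concat (cs : List Char) :
    pvDone cs (cs.length : Int) ++ pvAlive cs (cs.length : Int) =
      (PySem.List.pyRange 1 (cs.length : Int) 1).filter
        (fun j => pvLoopA (List.zip (PySem.List.slice cs (some 0) (some j)).reverse
                                    (PySem.List.slice cs (some j) none))) := by
  rcases Nat.eq_zero_or_pos cs.length with h0 | hpos
  · unfold pvDone pvAlive
    simp [h0, PySem.List.pyRange_one_eq_nil (by norm_num : (0:Int) ≤ 1)]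
  · set m : Nat := (cs.length + 1) / 2 with hmdef
    have hmfacts : cs.length ≤ 2 * m ∧ 2 * m ≤ cs.length + 1 ∧ 1 ≤ m := by omega
    have h1m : (1 : Int) ≤ (m : Int) := by exact_mod_cast hmfacts.2.2
    have hmn : (m : Int) ≤ (cs.length : Int) := by
      have h' : m ≤ cs.length := by omega
      exact_mod_cast h'
    rw [PySem.List.pyRange_one_append 1 (m : Int) (cs.length : Int) h1m hmn,
        List.filter_append]
    unfold pvDone pvAlive
    rw [PySem.List.pyRange_one_append 1 (m : Int) (cs.length : Int) h1m hmn,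
        List.filter_append, List.filter_append]
    have hd2 : (PySem.List.pyRange (m : Int) (cs.length : Int) 1).filter
        (fun j => decide (2 * j < (cs.length : Int)) && pvGood cs j (2 * j)) = [] := by
      rw [List.filter_eq_nil_iff]
      intro x hx
      rw [PySem.List.mem_pyRange_one] at hx
      simp only [Bool.and_eq_true, decide_eq_true_eq, not_and]
      intro h'
      exfalso; omega
    have ha1 : (PySem.List.pyRange 1 (m : Int) 1).filter
        (fun j => decide ((cs.length : Int) ≤ 2 * j) && pvGood cs j (cs.length : Int)) = [] := by
      rw [List.filter_eq_nil_iff]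
      intro x hx
      rw [PySem.List.mem_pyRange_one] at hx
      simp only [Bool.and_eq_true, decide_eq_true_eq, not_and]
      intro h'
      exfalso; omega
    rw [hd2, ha1, List.append_nil, List.nil_append]
    congr 1
    · apply (List.filter_congr _).symm
      intro x hx
      rw [PySem.List.mem_pyRange_one] at hx
      rw [pointwise cs x hx.1 (by omega)]
      simp [show 2 * x < (cs.length : Int) from by omega,
            show ¬((cs.length : Int) ≤ 2 * x) from by omega]
    · apply (List.filter_congr _).symm
      intro x hx
      rw [PySem.List.mem_pyRange_one] at hx
      rw [pointwise cs x (by omega) hx.2]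
      simp [show ¬(2 * x < (cs.length : Int)) from by omega,
            show (cs.length : Int) ≤ 2 * x from by omega]

theorem get_cands_eq (line : String) : get_cands line = get_cands_alt line := by
  unfold get_cands get_cands_alt
  rw [PySem.List.foldl_if_eq_foldl_filter
        (p := fun j : Int => pvLoopA (List.zip (PySem.List.slice line.toList (some 0) (some j)).reverse
                           (PySem.List.slice line.toList (some j) none)))
        (f := fun (cand : List Int) (j : Int) => PySem.Set.add cand j)]
  have hfold : ∀ (F : List Int),
      List.foldl (fun (cand : List Int) (j : Int) => PySem.Set.add cand j) PySem.Set.empty F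
        = PySem.Set.ofList F := fun _ => rfl
  rw [hfold]
  rcases Nat.eq_zero_or_pos line.toList.length with h0 | hpos
  · rw [h0]
    simp [PySem.List.pyRange_one_eq_nil (by norm_num : (0:Int) ≤ 1), PySem.Set.ofList]
  · obtain ⟨p, hp⟩ : ∃ p : Nat, line.toList.length = 1 + p := ⟨line.toList.length - 1, by omega⟩
    have hcast : (line.toList.length : Int) = 1 + (p : Int) := by exact_mod_cast hp
    rw [hcast, outer_inv line.toList p, ← hcast]
    exact congrArg PySem.Set.ofList (final_concat line.toList).symm

-- ===== VERDICT (by name: the statement is the Claim_ definition above) =====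
theorem get_cands_spec : Claim_equal_get_cands := by
  intro line _
  exact (get_cands_eq line).symm ▸ rfl
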